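-- pv_equiv track=rewrite | github.com/hakanovski/MPL | src/modules/occultator.py | execute_galethog_cipher
-- ===== SOURCE A (Python) =====
-- SIGIL_RING = "thaaoth-aoiveae-thaoth-aoiveae-thaoth-aoiveae-thaoth"
--
-- def execute_galethog_cipher(text):
--     """
--     Calculates a 'Stride' based on the input, then extracts
--     a hidden value from the Sigil Outer Ring.
--     Formula: Index = (Start + (n * Stride)) % Length
--     """
--     # 1. Determine Stride (Key) from input
--     stride = sum(ord(c) for c in text) % 40
--     if stride == 0: stride = 7 # Default to planetary factor
--
--     extracted_value = 0
--     ring_len = len(SIGIL_RING)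
--
--     # 2. Run the extraction loop
--     current_index = 0
--     for i in range(len(text)):
--         # The Galethog Jump
--         current_index = (current_index + stride) % ring_len
--         char_at_sigil = SIGIL_RING[current_index]
--         extracted_value += ord(char_at_sigil)
--
--     return extracted_value
-- ===== SOURCE B (Python) =====
-- SIGIL_RING = "thaaoth-aoiveae-thaoth-aoiveae-thaoth-aoiveae-thaoth"
--
-- def execute_galethog_cipher(text):
--     # Same stride key as the original, then a constant-size cycle computation
--     # instead of iterating once per character of the text.
--     stride = sum(ord(c) for c in text) % 40
--     if stride == 0:
--         stride = 7
--     ring_len = len(SIGIL_RING)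
--     # gcd(stride, ring_len) by Euclid
--     a, b = stride, ring_len
--     while b:
--         a, b = b, a % b
--     period = ring_len // a
--     # ord-values visited in one full period of the jump sequence
--     cycle = [ord(SIGIL_RING[((j + 1) * stride) % ring_len]) for j in range(period)]
--     q, r = divmod(len(text), period)
--     return q * sum(cycle) + sum(cycle[:r])
-- ===== Notes on version B (the rewrite author's own statement) =====
-- stated objective: faster
-- what changed: The per-character extraction loop over the ring is replaced by a constant-size cycle computation: the jump sequence (i+1)*stride % 52 is periodic with period 52/gcd(stride,52), so B sums one period once and combines the full-cycle count with a partial-cycle prefix via divmod.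
import Mathlib
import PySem

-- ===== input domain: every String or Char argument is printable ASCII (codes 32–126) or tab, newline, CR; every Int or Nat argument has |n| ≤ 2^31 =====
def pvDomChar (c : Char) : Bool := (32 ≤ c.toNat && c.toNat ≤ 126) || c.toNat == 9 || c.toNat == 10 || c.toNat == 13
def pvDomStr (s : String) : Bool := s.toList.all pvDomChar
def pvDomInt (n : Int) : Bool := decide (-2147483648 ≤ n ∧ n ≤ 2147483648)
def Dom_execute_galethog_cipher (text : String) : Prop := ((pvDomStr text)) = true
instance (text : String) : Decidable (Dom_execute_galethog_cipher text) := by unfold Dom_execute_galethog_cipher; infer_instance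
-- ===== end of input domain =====

-- B replaces A's per-character extraction loop by a constant-size cycle computation
-- (period of the stride-jump sequence, one full-cycle sum plus a partial-cycle sum);
-- objective: alternative decomposition (the stride key itself is still one pass over the text).

def SIGIL_RING : String := "thaaoth-aoiveae-thaoth-aoiveae-thaoth-aoiveae-thaoth"

-- ord(SIGIL_RING[i]); both programs only index with a value already reduced mod len(SIGIL_RING),
-- so pyGet? is always `some` and the 0 default is unreachable.
def pvOrdAt (i : Int) : Int :=
  match PySem.Str.pyGet? SIGIL_RING i with
  | some c => (c.toNat : Int)
  | none => 0

-- ===== PORT A =====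
def execute_galethog_cipher (text : String) : Int :=
  let stride0 := PySem.Int.mod (text.toList.foldl (fun acc c => acc + (c.toNat : Int)) 0) 40
  let stride := if stride0 = 0 then (7 : Int) else stride0
  let ring_len : Int := PySem.Str.len SIGIL_RING
  ((PySem.List.pyRange 0 (PySem.Str.len text) 1).foldl
    (fun (st : Int × Int) _ =>
      let cur := PySem.Int.mod (st.1 + stride) ring_len
      (cur, st.2 + pvOrdAt cur)) ((0 : Int), (0 : Int))).2

-- ===== PORT B =====
-- Euclid's gcd loop from Source B (`while b: a, b = b, a % b`); both arguments are
-- nonnegative Python ints, so Nat arithmetic is exact here.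
def pvGcdLoop : Nat → Nat → Nat
  | a, 0 => a
  | a, Nat.succ b => pvGcdLoop (Nat.succ b) (a % Nat.succ b)
  termination_by a b => b
  decreasing_by exact Nat.mod_lt _ (Nat.succ_pos b)

-- All quantities below (stride, lengths, quotients, remainders) are nonnegative
-- Python ints, so Nat `/` and `%` coincide with Python's `//` and `%` exactly.
def execute_galethog_cipher_alt (text : String) : Int :=
  let stride0 := PySem.Int.mod (text.toList.foldl (fun acc c => acc + (c.toNat : Int)) 0) 40
  let stride := if stride0 = 0 then (7 : Int) else stride0
  let s := stride.toNat
  let ring_len := SIGIL_RING.toList.length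
  let period := ring_len / pvGcdLoop s ring_len
  let cycle := (List.range period).map (fun j => pvOrdAt ((((j + 1) * s) % ring_len : Nat) : Int))
  let n := text.toList.length
  let q := n / period
  let r := n % period
  (q : Int) * cycle.sum + (cycle.take r).sum

-- ===== PRECONDITION & SPEC =====
def Spec_execute_galethog_cipher (text : String) (out : Int) : Prop := out = execute_galethog_cipher_alt text
instance (text : String) (out : Int) : Decidable (Spec_execute_galethog_cipher text out) := by unfold Spec_execute_galethog_cipher; infer_instance

-- ===== CLAIM (what is proved, stated in full; the proofs are below) =====
def Claim_equal_execute_galethog_cipher : Prop := ∀ (text : String), Dom_execute_galethog_cipher text → Spec_execute_galethog_cipher text (execute_galethog_cipher text)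

-- ===== LEMMAS AND PROOFS =====

-- the ord-value contributed by step j (0-based) of A's loop, for stride s
def pvFB (s j : Nat) : Int := pvOrdAt ((((j + 1) * s) % 52 : Nat) : Int)

-- sum of the first n loop contributions
def pvS (s n : Nat) : Int := ((List.range n).map (pvFB s)).sum

theorem pvGcdLoop_eq (a b : Nat) : pvGcdLoop a b = Nat.gcd b a := by
  induction a, b using pvGcdLoop.induct with
  | case1 a => simp [pvGcdLoop]
  | case2 a b ih => rw [pvGcdLoop, ih, Nat.gcd_succ]

theorem pv_loop (s n : Nat) :
    ((PySem.List.pyRange 0 (n : Int) 1).foldl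
      (fun (st : Int × Int) _ =>
        let cur := PySem.Int.mod (st.1 + (s : Int)) 52
        (cur, st.2 + pvOrdAt cur)) ((0 : Int), (0 : Int)))
    = (((n * s % 52 : Nat) : Int), pvS s n) := by
  induction n with
  | zero => simp [pvS]
  | succ n ih =>
    rw [show ((n + 1 : Nat) : Int) = (n : Int) + 1 by push_cast; ring,
        PySem.List.pyRange_one_succ_right (by positivity), List.foldl_append, ih]
    simp only [List.foldl_cons, List.foldl_nil]
    have hmod : PySem.Int.mod (((n * s % 52 : Nat) : Int) + (s : Int)) 52
        = (((n + 1) * s % 52 : Nat) : Int) := by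
      rw [PySem.Int.mod_eq_emod_of_pos (by norm_num)]
      have : (n * s % 52 + s) % 52 = (n + 1) * s % 52 := by
        rw [Nat.mod_add_mod, Nat.succ_mul]
      push_cast [← this]
      rfl
    simp only [hmod]
    congr 1
    rw [pvS, pvS, List.range_succ, List.map_append, List.sum_append]
    simp [pvFB]

theorem pv_dvd (s : Nat) : 52 ∣ (52 / Nat.gcd 52 s) * s := by
  set g := Nat.gcd 52 s with hg
  obtain ⟨t, ht⟩ : g ∣ s := by rw [hg]; exact Nat.gcd_dvd_right 52 s
  have hgd : g ∣ 52 := by rw [hg]; exact Nat.gcd_dvd_left 52 s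
  refine ⟨t, ?_⟩
  rw [ht, ← Nat.mul_assoc, Nat.div_mul_cancel hgd]

theorem pv_periodic (s p : Nat) (hdvd : 52 ∣ p * s) (j : Nat) : pvFB s (j + p) = pvFB s j := by
  obtain ⟨t, ht⟩ := hdvd
  unfold pvFB
  have : (j + p + 1) * s = (j + 1) * s + 52 * t := by rw [← ht]; ring
  rw [this, Nat.add_mul_mod_self_left]

theorem pv_split (s p : Nat) (hdvd : 52 ∣ p * s) (n : Nat) :
    pvS s (n + p) = pvS s n + pvS s p := by
  have h2 : (List.range n).map (pvFB s ∘ fun i => p + i) = (List.range n).map (pvFB s) := by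
    refine List.map_congr_left fun i _ => ?_
    simpa [Function.comp, Nat.add_comm] using pv_periodic s p hdvd i
  unfold pvS
  rw [Nat.add_comm n p, List.range_add, List.map_append, List.sum_append, List.map_map, h2]
  exact add_comm _ _

theorem pv_quot (s p : Nat) (hdvd : 52 ∣ p * s) (q r : Nat) :
    pvS s (q * p + r) = q * pvS s p + pvS s r := by
  induction q with
  | zero => simp
  | succ q ih =>
    have : (q + 1) * p + r = (q * p + r) + p := by ring
    rw [this, pv_split s p hdvd, ih]
    push_cast
    ring

-- ===== VERDICT (by name: the statement is the Claim_ definition above) =====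
theorem execute_galethog_cipher_spec : Claim_equal_execute_galethog_cipher := by
  intro text _
  simp only [Spec_execute_galethog_cipher, execute_galethog_cipher, execute_galethog_cipher_alt]
  have hlen : PySem.Str.len SIGIL_RING = 52 := by decide
  have hlen2 : SIGIL_RING.toList.length = 52 := by decide
  rw [hlen, hlen2, PySem.Str.len_eq]
  set n := text.toList.length with hn
  set st0 := PySem.Int.mod (text.toList.foldl (fun acc c => acc + (c.toNat : Int)) 0) 40 with hst0
  set stride := if st0 = 0 then (7 : Int) else st0 with hstr
  have hnn : (0 : Int) ≤ stride := by
    rw [hstr]; split_ifs with h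
    · norm_num
    · exact PySem.Int.mod_nonneg _ (by norm_num)
  set s := stride.toNat with hs
  have hcast : (s : Int) = stride := Int.toNat_of_nonneg hnn
  rw [← hcast, pvGcdLoop_eq, pv_loop s n]
  set p := 52 / Nat.gcd 52 s with hp
  have hppos : 0 < p := by
    rw [hp]
    exact Nat.div_pos (Nat.le_of_dvd (by norm_num) (Nat.gcd_dvd_left 52 s))
      (Nat.gcd_pos_of_pos_left _ (by norm_num))
  have hc : (fun j => pvOrdAt ((((j + 1) * s) % 52 : Nat) : Int)) = pvFB s := by
    funext j; rfl
  rw [hc, ← List.map_take, List.take_range, Nat.min_eq_left (Nat.le_of_lt (Nat.mod_lt n hppos))]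
  show pvS s n = ((n / p : Nat) : Int) * ((List.range p).map (pvFB s)).sum
      + ((List.range (n % p)).map (pvFB s)).sum
  conv_lhs => rw [← Nat.div_add_mod n p, Nat.mul_comm p (n / p)]
  exact pv_quot s p (pv_dvd s) (n / p) (n % p)
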